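-- pv_equiv track=rewrite | github.com/Danila23web/ZIT-241 | 9.1 задание.py | move_max_to_top_left
-- ===== SOURCE A (Python) =====
-- def move_max_to_top_left(matrix):
--
--     n = len(matrix)
--     m = len(matrix[0])
--
--     max_value = matrix[0][0]
--     max_row, max_col = 0, 0
--     for i in range(n):
--         for j in range(m):
--             if matrix[i][j] > max_value:
--                 max_value = matrix[i][j]
--                 max_row, max_col = i, j
--
--     if max_row != 0:
--         matrix[0], matrix[max_row] = matrix[max_row], matrix[0]
--
--     if max_col != 0:
--         for i in range(n):
--             matrix[i][0], matrix[i][max_col] = matrix[i][max_col], matrix[i][0]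
--
--     return matrix
-- ===== SOURCE B (Python) =====
-- def move_max_to_top_left(matrix):
--     m = len(matrix[0])
--     summaries = []
--     for row in matrix:
--         best_v, best_j = row[0], 0
--         for j, v in enumerate(row[:m]):
--             if v > best_v:
--                 best_v, best_j = v, j
--         summaries.append((best_v, best_j))
--     max_value, max_col = summaries[0]
--     max_row = 0
--     for i, (v, j) in enumerate(summaries):
--         if v > max_value:
--             max_value, max_row, max_col = v, i, j
--     if max_row != 0:
--         matrix[0], matrix[max_row] = matrix[max_row], matrix[0]
--     if max_col != 0:
--         for i in range(len(matrix)):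
--             matrix[i][0], matrix[i][max_col] = matrix[i][max_col], matrix[i][0]
--     return matrix
-- ===== Notes on version B (the rewrite author's own statement) =====
-- stated objective: alternative
-- what changed: B replaces A's single nested scan carrying a global (max, row, col) by a two-phase decomposition: a first pass computes per-row (max, argcol) summaries, a second pass picks the first row achieving the global maximum; the row/column swaps are then applied as in A.
import Mathlib
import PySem

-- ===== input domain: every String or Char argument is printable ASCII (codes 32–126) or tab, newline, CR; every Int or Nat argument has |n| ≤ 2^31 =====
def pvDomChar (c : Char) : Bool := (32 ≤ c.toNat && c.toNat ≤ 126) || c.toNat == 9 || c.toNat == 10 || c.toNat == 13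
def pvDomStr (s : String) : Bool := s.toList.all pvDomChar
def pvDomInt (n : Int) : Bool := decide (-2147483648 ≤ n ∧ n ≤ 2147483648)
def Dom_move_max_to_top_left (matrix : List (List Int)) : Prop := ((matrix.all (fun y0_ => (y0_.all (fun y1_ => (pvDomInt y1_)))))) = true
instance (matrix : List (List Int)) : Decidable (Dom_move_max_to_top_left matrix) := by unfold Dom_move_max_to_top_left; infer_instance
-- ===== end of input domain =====

-- B replaces A's single nested argmax scan by per-row (max, argcol) summaries plus a
-- cross-row pick (objective: alternative decomposition, same cost); both mutate the
-- matrix in place in Python identically (row swap + column swap).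

-- ===== PORT A =====
-- one step of A's inner scan over row p.1 (q = (j, matrix[i][j])); state = (max_value, max_row, max_col)
def pvInnStep (i : Int) (st : Int × Int × Int) (q : Int × Int) : Int × Int × Int :=
  if q.2 > st.1 then (q.2, i, q.1) else st

def move_max_to_top_left (matrix : List (List Int)) : List (List Int) :=
  let m := (matrix.headD []).length
  -- for i in range(n): for j in range(m): …  (row i is read only up to column m-1)
  let st := (PySem.List.enumerate matrix 0).foldl
    (fun (st : Int × Int × Int) p => (PySem.List.enumerate (p.2.take m) 0).foldl (pvInnStep p.1) st)
    ((matrix.headD []).headD 0, 0, 0)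
  let m1 := if st.2.1 ≠ 0 then (matrix.set 0 (matrix.getD st.2.1.toNat [])).set st.2.1.toNat (matrix.getD 0 []) else matrix
  if st.2.2 ≠ 0 then m1.map (fun row => (row.set 0 (row.getD st.2.2.toNat 0)).set st.2.2.toNat (row.getD 0 0)) else m1

-- ===== PORT B =====
-- one step of a per-row argmax; state = (best_v, best_j)
def pvRowStep (st : Int × Int) (q : Int × Int) : Int × Int :=
  if q.2 > st.1 then (q.2, q.1) else st

-- (best_v, best_j) of row[:m], first occurrence of the maximum
def pvRowSummary (m : Nat) (row : List Int) : Int × Int :=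
  (PySem.List.enumerate (row.take m) 0).foldl pvRowStep (row.headD 0, 0)

-- one step of the cross-row pick over (i, (v, j)); state = (max_value, max_row, max_col)
def pvPickStep (st : Int × Int × Int) (p : Int × Int × Int) : Int × Int × Int :=
  if p.2.1 > st.1 then (p.2.1, p.1, p.2.2) else st

def move_max_to_top_left_alt (matrix : List (List Int)) : List (List Int) :=
  let m := (matrix.headD []).length
  let summaries := matrix.map (pvRowSummary m)
  let s0 := summaries.headD (0, 0)
  let pick := (PySem.List.enumerate summaries 0).foldl pvPickStep (s0.1, 0, s0.2)
  let m1 := if pick.2.1 ≠ 0 then (matrix.set 0 (matrix.getD pick.2.1.toNat [])).set pick.2.1.toNat (matrix.getD 0 []) else matrix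
  if pick.2.2 ≠ 0 then m1.map (fun row => (row.set 0 (row.getD pick.2.2.toNat 0)).set pick.2.2.toNat (row.getD 0 0)) else m1

-- ===== PRECONDITION & SPEC =====
-- exactly the inputs on which Python A returns: a nonempty matrix whose first row is
-- nonempty and each row has at least len(matrix[0]) columns (else A raises IndexError)
def Pre_move_max_to_top_left (matrix : List (List Int)) : Prop :=
  matrix ≠ [] ∧ matrix.headD [] ≠ [] ∧ ∀ row ∈ matrix, (matrix.headD []).length ≤ row.length
instance (matrix : List (List Int)) : Decidable (Pre_move_max_to_top_left matrix) := by
  unfold Pre_move_max_to_top_left; infer_instance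

def pvWitness_move_max_to_top_left : List (List Int) := [[1, 2], [3, 4]]

def Spec_move_max_to_top_left (matrix : List (List Int)) (out : List (List Int)) : Prop := out = move_max_to_top_left_alt matrix
instance (matrix : List (List Int)) (out : List (List Int)) : Decidable (Spec_move_max_to_top_left matrix out) := by unfold Spec_move_max_to_top_left; infer_instance

-- ===== CLAIM (what is proved, stated in full; the proofs are below) =====
def Claim_equal_move_max_to_top_left : Prop := ∀ (matrix : List (List Int)), Dom_move_max_to_top_left matrix → Pre_move_max_to_top_left matrix → Spec_move_max_to_top_left matrix (move_max_to_top_left matrix)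

-- ===== LEMMAS AND PROOFS =====

-- the per-row fold never decreases its running maximum
theorem pvRow_mono (js : List (Int × Int)) (st : Int × Int) :
    st.1 ≤ (js.foldl pvRowStep st).1 := by
  induction js generalizing st with
  | nil => simp [List.foldl]
  | cons q js ih =>
    simp only [List.foldl, pvRowStep]
    split_ifs with h
    · exact le_trans (le_of_lt h) (ih _)
    · exact ih st

-- the per-row fold either leaves the state untouched or strictly increases the maximum
theorem pvRow_change (js : List (Int × Int)) (st : Int × Int) :
    js.foldl pvRowStep st = st ∨ st.1 < (js.foldl pvRowStep st).1 := by
  induction js generalizing st with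
  | nil => simp [List.foldl]
  | cons q js ih =>
    simp only [List.foldl, pvRowStep]
    split_ifs with h
    · right
      exact lt_of_lt_of_le h (pvRow_mono js _)
    · exact ih st

-- A's tagged inner scan expressed through the untagged per-row fold
theorem pvInn_eq (js : List (Int × Int)) (i v r c : Int) :
    js.foldl (pvInnStep i) (v, r, c)
      = (let s := js.foldl pvRowStep (v, c);
         if s.1 > v then (s.1, i, s.2) else (v, r, c)) := by
  induction js generalizing v r c with
  | nil => simp [List.foldl]
  | cons q js ih =>
    simp only [List.foldl]
    by_cases h : q.2 > v
    · have e1 : pvInnStep i (v, r, c) q = (q.2, i, q.1) := by simp [pvInnStep, h]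
      have e2 : pvRowStep (v, c) q = (q.2, q.1) := by simp [pvRowStep, h]
      rw [e1, e2, ih]
      have hv : v < (js.foldl pvRowStep (q.2, q.1)).1 := lt_of_lt_of_le h (pvRow_mono js _)
      rcases pvRow_change js (q.2, q.1) with he | hs
      · rw [he]; simp [h]
      · have hs' : q.2 < (js.foldl pvRowStep (q.2, q.1)).1 := hs
        simp [hs', hv]
    · have e1 : pvInnStep i (v, r, c) q = (v, r, c) := by simp [pvInnStep, h]
      have e2 : pvRowStep (v, c) q = (v, c) := by simp [pvRowStep, h]
      rw [e1, e2, ih]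

-- replacing the start value by a smaller one only matters if the fold beats the larger one
theorem pvRow_start (js : List (Int × Int)) (v c v' c' : Int) (hle : v' ≤ v) :
    js.foldl pvRowStep (v, c)
      = (let s := js.foldl pvRowStep (v', c');
         if s.1 > v then s else (v, c)) := by
  induction js generalizing v c v' c' with
  | nil =>
    have hno : ¬ v' > v := not_lt.mpr hle
    simp [List.foldl, hno]
  | cons q js ih =>
    simp only [List.foldl]
    by_cases h1 : q.2 > v
    · have h2 : q.2 > v' := lt_of_le_of_lt hle h1
      have e1 : pvRowStep (v, c) q = (q.2, q.1) := by simp [pvRowStep, h1]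
      have e2 : pvRowStep (v', c') q = (q.2, q.1) := by simp [pvRowStep, h2]
      rw [e1, e2]
      have hm : v < (js.foldl pvRowStep (q.2, q.1)).1 := lt_of_lt_of_le h1 (pvRow_mono js _)
      simp [hm]
    · by_cases h2 : q.2 > v'
      · have e1 : pvRowStep (v, c) q = (v, c) := by simp [pvRowStep, h1]
        have e2 : pvRowStep (v', c') q = (q.2, q.1) := by simp [pvRowStep, h2]
        rw [e1, e2]
        exact ih v c q.2 q.1 (not_lt.mp h1)
      · have e1 : pvRowStep (v, c) q = (v, c) := by simp [pvRowStep, h1]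
        have e2 : pvRowStep (v', c') q = (v', c') := by simp [pvRowStep, h2]
        rw [e1, e2]
        exact ih v c v' c' hle

-- A's inner scan of a nonempty (enumerated) row, via the row's own summary fold
theorem pvInn_summary (j0 h : Int) (tl : List (Int × Int)) (i v r c : Int) :
    ((j0, h) :: tl).foldl (pvInnStep i) (v, r, c)
      = (let s := ((j0, h) :: tl).foldl pvRowStep (h, j0);
         if s.1 > v then (s.1, i, s.2) else (v, r, c)) := by
  have hstep : pvRowStep (h, j0) (j0, h) = (h, j0) := by simp [pvRowStep]
  by_cases hv : h > v
  · have e1 : pvInnStep i (v, r, c) (j0, h) = (h, i, j0) := by simp [pvInnStep, hv]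
    simp only [List.foldl, e1, hstep]
    rw [pvInn_eq]
    have hm : v < (tl.foldl pvRowStep (h, j0)).1 := lt_of_lt_of_le hv (pvRow_mono tl _)
    rcases pvRow_change tl (h, j0) with he | hs
    · rw [he]; simp [hv]
    · have hs' : h < (tl.foldl pvRowStep (h, j0)).1 := hs
      simp [hs', hm]
  · have e1 : pvInnStep i (v, r, c) (j0, h) = (v, r, c) := by simp [pvInnStep, hv]
    simp only [List.foldl, e1, hstep]
    rw [pvInn_eq, pvRow_start tl v c h j0 (not_lt.mp hv)]
    by_cases hgt : (tl.foldl pvRowStep (h, j0)).1 > v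
    · simp [hgt]
    · simp [hgt]

-- the whole of A's nested scan equals a pick over the per-row summaries
theorem pvOuter_eq (m : Nat) (L : List (Int × List Int)) (st : Int × Int × Int)
    (hL : ∀ p ∈ L, p.2.take m ≠ []) :
    L.foldl (fun st p => (PySem.List.enumerate (p.2.take m) 0).foldl (pvInnStep p.1) st) st
      = (L.map (fun p => (p.1, pvRowSummary m p.2))).foldl pvPickStep st := by
  induction L generalizing st with
  | nil => rfl
  | cons p L ih =>
    simp only [List.foldl, List.map]
    rw [ih _ (fun q hq => hL q (List.mem_cons_of_mem _ hq))]
    congr 1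
    obtain ⟨v, r, c⟩ := st
    have hne := hL p (List.mem_cons_self ..)
    obtain ⟨h, tl, htk⟩ : ∃ h tl, p.2.take m = h :: tl := by
      cases hx : p.2.take m with
      | nil => exact absurd hx hne
      | cons a l => exact ⟨a, l, rfl⟩
    have hhead : p.2.headD 0 = h := by
      cases m with
      | zero => rw [List.take_zero] at htk; simp at htk
      | succ k =>
        have hth : (p.2.take (k + 1)).headD 0 = p.2.headD 0 := by cases p.2 <;> simp
        rw [← hth, htk]
        rfl
    rw [htk, PySem.List.enumerate_cons]
    rw [pvInn_summary]
    simp only [pvRowSummary, htk, hhead, PySem.List.enumerate_cons, pvPickStep]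

-- enumerate commutes with map
theorem pvEnum_map {α β : Type} (f : α → β) (xs : List α) (s : Int) :
    PySem.List.enumerate (xs.map f) s
      = (PySem.List.enumerate xs s).map (fun p => (p.1, f p.2)) := by
  induction xs generalizing s with
  | nil => simp [PySem.List.enumerate_nil]
  | cons x xs ih => simp [PySem.List.enumerate_cons, ih]

-- the two scan results coincide on Pre_
theorem pvScan_eq (matrix : List (List Int)) (hpre : Pre_move_max_to_top_left matrix) :
    (PySem.List.enumerate matrix 0).foldl
        (fun (st : Int × Int × Int) p =>
          (PySem.List.enumerate (p.2.take (matrix.headD []).length) 0).foldl (pvInnStep p.1) st)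
        ((matrix.headD []).headD 0, 0, 0)
      = (PySem.List.enumerate (matrix.map (pvRowSummary (matrix.headD []).length)) 0).foldl
          pvPickStep
          (((matrix.map (pvRowSummary (matrix.headD []).length)).headD (0, 0)).1, 0,
            ((matrix.map (pvRowSummary (matrix.headD []).length)).headD (0, 0)).2) := by
  obtain ⟨hne, hhd, hlen⟩ := hpre
  set m := (matrix.headD []).length with hm
  have hshape : ∀ p ∈ PySem.List.enumerate matrix 0, p.2.take m ≠ [] := by
    intro p hp
    have h2 : p.2 ∈ matrix := by
      have hmem : p.2 ∈ (PySem.List.enumerate matrix 0).map (fun x => x.2) := List.mem_map_of_mem hp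
      rwa [PySem.List.map_snd_enumerate] at hmem
    have hlen2 : m ≤ p.2.length := hlen _ h2
    have hm1 : 1 ≤ m := by
      cases hx : matrix.headD [] with
      | nil => exact absurd hx hhd
      | cons a l => rw [hm, hx]; simp
    intro hcon
    rcases List.take_eq_nil_iff.mp hcon with h0 | h0
    · omega
    · rw [h0] at hlen2; simp at hlen2; omega
  rw [pvOuter_eq m _ _ hshape, pvEnum_map]
  -- now both sides fold pvPickStep over the same list; align the start states
  cases hmat : matrix with
  | nil => exact absurd hmat hne
  | cons r0 rs =>
    have hr0 : r0 ≠ [] := by simpa [hmat] using hhd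
    obtain ⟨h0, t0, hr0e⟩ : ∃ h0 t0, r0 = h0 :: t0 := by
      cases r0 with
      | nil => exact absurd rfl hr0
      | cons a l => exact ⟨a, l, rfl⟩
    simp only [hr0e, PySem.List.enumerate_cons, List.map_cons, List.foldl_cons,
      List.headD_cons]
    congr 1
    -- first pick step from A's init (matrix[0][0], 0, 0) lands on B's init (s0.1, 0, s0.2)
    have hstart : pvRowSummary m (h0 :: t0)
        = (PySem.List.enumerate ((h0 :: t0).take m) 0).foldl pvRowStep (h0, 0) := by
      simp [pvRowSummary]
    rcases pvRow_change (PySem.List.enumerate ((h0 :: t0).take m) 0) (h0, 0) with he | hs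
    · rw [hstart, he]
    · have hlt : h0 < (pvRowSummary m (h0 :: t0)).1 := by rw [hstart]; exact hs
      simp [pvPickStep, hlt]

-- ===== VERDICT (by name: the statement is the Claim_ definition above) =====
theorem move_max_to_top_left_spec : Claim_equal_move_max_to_top_left := by
  intro matrix _ hpre
  unfold Spec_move_max_to_top_left
  unfold move_max_to_top_left move_max_to_top_left_alt
  simp only
  rw [pvScan_eq matrix hpre]
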